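-- pv_equiv track=rewrite | github.com/JH-TT/Coding_Practice | BaekJoon/Dynamic/1727.py | check
-- ===== SOURCE A (Python) =====
-- def check(a, b): # a가 적은 인원, b가 많은 인원
--     # p[i][j] i가 j번째까지 본 조합중에 최솟값을 저장.
--     p = [[0 for _ in range(len(b)+1)] for _ in range(len(a)+1)]
--     for i in range(1, len(a)+1):
--         for j in range(i, len(b)+1):
--             if i == j: # 남, 여가 같은 수이면 이전값 + 현재 커플값 해준다.
--                 p[i][j] = p[i-1][j-1] + abs(a[i-1] - b[j-1])
--             else: # 그렇지 않다면 솔로가 되거나 커플이 되거나 둘 중 하나.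
--                 p[i][j] = min(p[i][j-1], p[i-1][j-1] + abs(a[i-1]-b[j-1]))
--     return p[len(a)][len(b)]
-- ===== SOURCE B (Python) =====
-- def check(a, b):
--     # Top-down memoized recursion instead of A's bottom-up table fill.
--     # f(i, j) = min cost of matching the first i of a into the first j of b.
--     memo = {}
--
--     def f(i, j):
--         if i == 0 or i > j:
--             return 0
--         key = (i, j)
--         if key in memo:
--             return memo[key]
--         c = abs(a[i - 1] - b[j - 1])
--         if i == j:
--             r = f(i - 1, j - 1) + c
--         else:
--             r = min(f(i, j - 1), f(i - 1, j - 1) + c)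
--         memo[key] = r
--         return r
--
--     return f(len(a), len(b))
-- ===== Notes on version B (the rewrite author's own statement) =====
-- stated objective: faster
-- what changed: Replaces A's bottom-up fill of the full (len(a)+1) x (len(b)+1) table by a top-down memoized recursion f(i,j) that only computes the ~len(a)*(len(b)-len(a)+1) states reachable from (len(a),len(b)); A's zero-initialized unfilled cells become the explicit base case i > j.
import Mathlib
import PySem

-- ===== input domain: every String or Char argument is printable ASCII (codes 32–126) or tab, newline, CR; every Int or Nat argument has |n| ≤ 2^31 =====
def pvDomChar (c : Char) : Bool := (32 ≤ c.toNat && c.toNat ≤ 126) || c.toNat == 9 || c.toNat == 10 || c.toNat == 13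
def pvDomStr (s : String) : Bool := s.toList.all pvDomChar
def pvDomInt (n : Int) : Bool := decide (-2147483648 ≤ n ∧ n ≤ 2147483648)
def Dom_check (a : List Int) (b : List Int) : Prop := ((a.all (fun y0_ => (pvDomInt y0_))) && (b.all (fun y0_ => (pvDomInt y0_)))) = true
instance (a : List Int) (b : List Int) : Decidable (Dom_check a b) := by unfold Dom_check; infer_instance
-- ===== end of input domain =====

-- B: top-down memoized recursion over only the DP states reachable from (len(a),len(b)), instead of A's full bottom-up 2-D table fill
-- (memoized in Source B; the memo table only caches, the recursion computes the same values).

-- ===== PORT A =====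
-- p[i][j] read: indices are always in range in A, so getD is exact here
def tget (p : List (List Int)) (i j : Nat) : Int := (p.getD i []).getD j 0
-- p[i][j] = v: indices are always in range in A, so List.set is exact here
def tset (p : List (List Int)) (i j : Nat) (v : Int) : List (List Int) :=
  p.set i ((p.getD i []).set j v)

-- body of A's inner loop (loop indices satisfy 1 <= i <= j, so .toNat and a[i-1], b[j-1] are exact)
def innerStep (a b : List Int) (i : Int) (p : List (List Int)) (j : Int) : List (List Int) :=
  let ii := i.toNat
  let jj := j.toNat
  if i == j then
    tset p ii jj (tget p (ii - 1) (jj - 1) + |a.getD (ii - 1) 0 - b.getD (jj - 1) 0|)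
  else
    tset p ii jj (min (tget p ii (jj - 1))
      (tget p (ii - 1) (jj - 1) + |a.getD (ii - 1) 0 - b.getD (jj - 1) 0|))

-- body of A's outer loop: for j in range(i, len(b)+1): ...
def outerStep (a b : List Int) (p : List (List Int)) (i : Int) : List (List Int) :=
  (PySem.List.pyRange i ((b.length : Int) + 1) 1).foldl (innerStep a b i) p

def check (a : List Int) (b : List Int) : Int :=
  -- p = [[0]*(len(b)+1) for _ in range(len(a)+1)]
  let p0 : List (List Int) := List.replicate (a.length + 1) (List.replicate (b.length + 1) (0 : Int))
  tget ((PySem.List.pyRange 1 ((a.length : Int) + 1) 1).foldl (outerStep a b) p0) a.length b.length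

-- ===== PORT B =====
-- f(i, j): min cost of matching the first i of a into the first j of b (Source B's recursion;
-- the memo dict of Source B is a pure cache and is elided).
def fmatch (a : List Int) (b : List Int) : Nat → Nat → Int
  | 0, _ => 0
  | _ + 1, 0 => 0
  | i + 1, j + 1 =>
    if j + 1 < i + 1 then 0
    else
      let c := |a.getD i 0 - b.getD j 0|
      if i + 1 = j + 1 then fmatch a b i j + c
      else min (fmatch a b (i + 1) j) (fmatch a b i j + c)

def check_alt (a : List Int) (b : List Int) : Int := fmatch a b a.length b.length

-- ===== PRECONDITION & SPEC =====
def Spec_check (a : List Int) (b : List Int) (out : Int) : Prop := out = check_alt a b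
instance (a : List Int) (b : List Int) (out : Int) : Decidable (Spec_check a b out) := by unfold Spec_check; infer_instance

-- ===== CLAIM (what is proved, stated in full; the proofs are below) =====
def Claim_equal_check : Prop := ∀ (a : List Int) (b : List Int), Dom_check a b → Spec_check a b (check a b)

-- ===== LEMMAS AND PROOFS =====

theorem fmatch_zero_of_lt (a b : List Int) (i j : Nat) (h : j < i) :
    fmatch a b i j = 0 := by
  match i, j with
  | 0, _ => omega
  | _ + 1, 0 => rfl
  | i + 1, j + 1 => simp only [fmatch]; rw [if_pos (by omega)]

theorem row_getD_set_ne (l : List Int) (n : Nat) (v : Int) (j : Nat) (h : j ≠ n) :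
    ((l.set n v).getD j 0) = l.getD j 0 := by
  rw [List.getD_eq_getElem?_getD, List.getD_eq_getElem?_getD,
    List.getElem?_set_ne (by omega)]

theorem row_getD_replicate (m j : Nat) : ((List.replicate m (0 : Int)).getD j 0) = 0 := by
  rw [List.getD_eq_getElem?_getD]
  rcases Nat.lt_or_ge j m with h | h
  · simp [h]
  · rw [List.getElem?_eq_none (by simpa using h)]; rfl

theorem rows_replicate (n i : Nat) (r : List Int) (h : i < n) :
    (List.replicate n r).getD i [] = r := by
  rw [List.getD_eq_getElem?_getD, List.getElem?_replicate]
  simp [h]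

theorem tset_length (p : List (List Int)) (i j : Nat) (v : Int) :
    (tset p i j v).length = p.length := by simp [tset]

theorem tset_getD_ne (p : List (List Int)) (i j : Nat) (v : Int) (i' : Nat) (h : i' ≠ i) :
    (tset p i j v).getD i' [] = p.getD i' [] := by
  rw [tset, List.getD_eq_getElem?_getD, List.getElem?_set_ne (by omega)]
  exact List.getD_eq_getElem?_getD.symm

theorem tset_getD_self (p : List (List Int)) (i j : Nat) (v : Int) (hi : i < p.length) :
    (tset p i j v).getD i [] = (p.getD i []).set j v := by
  simp [tset, List.getD_eq_getElem?_getD, List.getElem?_set_self hi]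

-- one inner-loop pass: processes columns i, i+1, …, i+k-1 of row i
theorem inner_loop (a b : List Int) (i : Nat) (hi1 : 1 ≤ i) (hia : i ≤ a.length)
    (k : Nat) (hk : i + k ≤ b.length + 1) (p : List (List Int))
    (hlen : p.length = a.length + 1)
    (hrow : (p.getD i []).length = b.length + 1)
    (hprev : ∀ j, j ≤ b.length → tget p (i - 1) j = fmatch a b (i - 1) j) :
    ∀ q, q = (PySem.List.pyRange (i : Int) ((i : Int) + (k : Int)) 1).foldl
        (innerStep a b (i : Int)) p →
    (∀ i', i' ≠ i → q.getD i' [] = p.getD i' []) ∧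
      q.length = p.length ∧ (q.getD i []).length = (p.getD i []).length ∧
      (∀ j, i ≤ j → j < i + k → tget q i j = fmatch a b i j) ∧
      (∀ j, j < i → tget q i j = tget p i j) := by
  induction k generalizing p with
  | zero =>
    intro q hq
    rw [show ((i : Int) + ((0 : Nat) : Int)) = (i : Int) by simp,
      PySem.List.pyRange_one_eq_nil (le_refl _), List.foldl_nil] at hq
    subst hq
    exact ⟨fun _ _ => rfl, rfl, rfl, fun j h1 h2 => by omega, fun _ _ => rfl⟩
  | succ k ih =>
    intro q hq
    have hsplit : PySem.List.pyRange (i : Int) ((i : Int) + ((k + 1 : Nat) : Int)) 1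
        = PySem.List.pyRange (i : Int) ((i : Int) + (k : Int)) 1 ++ [(i : Int) + (k : Int)] := by
      rw [show ((i : Int) + ((k + 1 : Nat) : Int)) = ((i : Int) + (k : Int)) + 1 by push_cast; ring,
        PySem.List.pyRange_one_succ_right (by omega)]
    rw [hsplit, List.foldl_append, List.foldl_cons, List.foldl_nil] at hq
    obtain ⟨ih1, ih2, ih3, ih4, ih5⟩ := ih (by omega) p hlen hrow hprev _ rfl
    set q0 := (PySem.List.pyRange (i : Int) ((i : Int) + (k : Int)) 1).foldl
      (innerStep a b (i : Int)) p with hq0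
    have hq0len : q0.length = a.length + 1 := by rw [ih2, hlen]
    have hq0row : (q0.getD i []).length = b.length + 1 := by rw [ih3, hrow]
    have hilt : i < q0.length := by omega
    have htnat : ((i : Int) + (k : Nat)).toNat = i + k := by
      rw [show ((i : Int) + (k : Nat)) = ((i + k : Nat) : Int) by push_cast; ring,
        Int.toNat_natCast]
    have hprev' : ∀ j, j ≤ b.length → tget q0 (i - 1) j = fmatch a b (i - 1) j := by
      intro j hj
      have := ih1 (i - 1) (by omega)
      simp only [tget, this]
      exact hprev j hj
    obtain ⟨m, rfl⟩ : ∃ m, i = m + 1 := ⟨i - 1, by omega⟩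
    have hsucc : m + 1 - 1 = m := by omega
    rcases Nat.eq_zero_or_pos k with hk0 | hkpos
    · -- k = 0: first column, the i == j branch
      subst hk0
      rw [innerStep] at hq
      simp only [Nat.cast_zero, add_zero, Int.toNat_natCast, beq_self_eq_true, if_true] at hq
      subst hq
      refine ⟨?_, ?_, ?_, ?_, ?_⟩
      · intro i' hne; rw [tset_getD_ne _ _ _ _ _ hne]; exact ih1 i' hne
      · rw [tset_length]; omega
      · rw [tset_getD_self _ _ _ _ hilt, List.length_set]; exact ih3
      · intro j h1 h2
        have hj : j = m + 1 := by omega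
        subst hj
        rw [tget, tset_getD_self _ _ _ _ hilt, hsucc]
        have hlt : m + 1 < (q0.getD (m + 1) []).length := by omega
        rw [List.getD_eq_getElem?_getD, List.getElem?_set_self hlt]
        simp only [Option.getD_some]
        have hm : m ≤ b.length := by omega
        rw [show tget q0 m m = fmatch a b m m from by
          have := hprev' m hm; rwa [hsucc] at this]
        simp [fmatch]
      · intro j hj
        rw [tget, tset_getD_self _ _ _ _ hilt, row_getD_set_ne _ _ _ _ (by omega)]
        exact ih5 j hj
    · -- k ≥ 1: the else branch
      have hcond : (((m + 1 : Nat) : Int) == ((m + 1 : Nat) : Int) + ((k : Nat) : Int)) = false := by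
        rw [beq_eq_false_iff_ne]
        intro hc
        omega
      rw [innerStep] at hq
      simp only [htnat, hcond, Bool.false_eq_true, if_false, Int.toNat_natCast] at hq
      subst hq
      have hjlt : m + 1 + k < (q0.getD (m + 1) []).length := by omega
      refine ⟨?_, ?_, ?_, ?_, ?_⟩
      · intro i' hne; rw [tset_getD_ne _ _ _ _ _ hne]; exact ih1 i' hne
      · rw [tset_length]; omega
      · rw [tset_getD_self _ _ _ _ hilt, List.length_set]; exact ih3
      · intro j h1 h2
        rcases Nat.lt_or_ge j (m + 1 + k) with hjlt' | hjge
        · rw [tget, tset_getD_self _ _ _ _ hilt, row_getD_set_ne _ _ _ _ (by omega)]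
          exact ih4 j h1 hjlt'
        · have hj : j = m + 1 + k := by omega
          subst hj
          rw [tget, tset_getD_self _ _ _ _ hilt]
          rw [List.getD_eq_getElem?_getD, List.getElem?_set_self hjlt]
          simp only [Option.getD_some, hsucc]
          rw [show m + 1 + k - 1 = m + k by omega]
          have e1 : tget q0 (m + 1) (m + k) = fmatch a b (m + 1) (m + k) :=
            ih4 (m + k) (by omega) (by omega)
          have e2 : tget q0 m (m + k) = fmatch a b m (m + k) := by
            have := hprev' (m + k) (by omega)
            rwa [hsucc] at this
          rw [e1, e2]
          rw [show fmatch a b (m + 1) (m + 1 + k) = min (fmatch a b (m + 1) (m + k))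
              (fmatch a b m (m + k) + |a.getD m 0 - b.getD (m + k) 0|) from by
            rw [show m + 1 + k = (m + k) + 1 by omega]
            simp only [fmatch]
            rw [if_neg (by omega), if_neg (by omega)]]
      · intro j hj
        rw [tget, tset_getD_self _ _ _ _ hilt, row_getD_set_ne _ _ _ _ (by omega)]
        exact ih5 j hj

-- the outer loop: after processing rows 1..n, rows i' ≤ n hold fmatch and the rest are still zero
theorem outer_loop (a b : List Int) (n : Nat) (hn : n ≤ a.length) :
    ∀ q, q = (PySem.List.pyRange 1 ((n : Int) + 1) 1).foldl (outerStep a b)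
        (List.replicate (a.length + 1) (List.replicate (b.length + 1) (0 : Int))) →
    q.length = a.length + 1 ∧
      (∀ i', n < i' → i' ≤ a.length → q.getD i' [] = List.replicate (b.length + 1) (0 : Int)) ∧
      (∀ i' j, i' ≤ n → j ≤ b.length → tget q i' j = fmatch a b i' j) := by
  induction n with
  | zero =>
    intro q hq
    rw [show ((0 : Nat) : Int) + 1 = 1 by simp, PySem.List.pyRange_one_eq_nil (le_refl _),
      List.foldl_nil] at hq
    subst hq
    refine ⟨by simp, ?_, ?_⟩
    · intro i' h1 h2; exact rows_replicate _ _ _ (by omega)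
    · intro i' j h1 h2
      have : i' = 0 := by omega
      subst this
      rw [tget, rows_replicate _ _ _ (by omega), row_getD_replicate]
      simp [fmatch]
  | succ n ihn =>
    intro q hq
    have hsplit : PySem.List.pyRange 1 (((n + 1 : Nat) : Int) + 1) 1
        = PySem.List.pyRange 1 ((n : Int) + 1) 1 ++ [((n + 1 : Nat) : Int)] := by
      rw [show (((n + 1 : Nat) : Int) + 1) = ((n : Int) + 1) + 1 by push_cast; ring,
        PySem.List.pyRange_one_succ_right (by omega)]
      push_cast
      ring_nf
    rw [hsplit, List.foldl_append, List.foldl_cons, List.foldl_nil] at hq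
    obtain ⟨o1, o2, o3⟩ := ihn (by omega) _ rfl
    set q0 := (PySem.List.pyRange 1 ((n : Int) + 1) 1).foldl (outerStep a b)
      (List.replicate (a.length + 1) (List.replicate (b.length + 1) (0 : Int))) with hq0
    have hrow : (q0.getD (n + 1) []).length = b.length + 1 := by
      rw [o2 (n + 1) (by omega) (by omega), List.length_replicate]
    have hprev : ∀ j, j ≤ b.length → tget q0 (n + 1 - 1) j = fmatch a b (n + 1 - 1) j := by
      intro j hj
      rw [show n + 1 - 1 = n by omega]
      exact o3 n j (le_refl _) hj
    rw [outerStep] at hq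
    rcases Nat.lt_or_ge n (b.length + 1) with hsmall | hbig
    · -- row n + 1 reaches the inner loop with k = b.length + 1 - (n + 1) iterations
      rw [show ((b.length : Int) + 1)
          = ((n + 1 : Nat) : Int) + ((b.length + 1 - (n + 1) : Nat) : Int) by push_cast; omega] at hq
      obtain ⟨i1, i2, i3, i4, i5⟩ := inner_loop a b (n + 1) (by omega) (by omega)
        (b.length + 1 - (n + 1)) (by omega) q0 o1 hrow hprev q hq
      refine ⟨by rw [i2, o1], ?_, ?_⟩
      · intro i' h1 h2
        rw [i1 i' (by omega)]
        exact o2 i' (by omega) h2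
      · intro i' j h1 hj
        rcases Nat.lt_or_ge i' (n + 1) with hi' | hi'
        · rw [tget, i1 i' (by omega)]
          exact o3 i' j (by omega) hj
        · have : i' = n + 1 := by omega
          subst this
          rcases Nat.lt_or_ge j (n + 1) with hlt | hge
          · rw [i5 j hlt, tget, o2 (n + 1) (by omega) (by omega), row_getD_replicate,
              fmatch_zero_of_lt a b _ _ hlt]
          · exact i4 j hge (by omega)
    · -- n + 1 > b.length + 1: the inner range is empty and row n + 1 stays zero
      rw [PySem.List.pyRange_one_eq_nil (by push_cast; omega), List.foldl_nil] at hq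
      subst hq
      refine ⟨o1, ?_, ?_⟩
      · intro i' h1 h2; exact o2 i' (by omega) h2
      · intro i' j h1 hj
        rcases Nat.lt_or_ge i' (n + 1) with hi' | hi'
        · exact o3 i' j (by omega) hj
        · have : i' = n + 1 := by omega
          subst this
          rw [tget, o2 (n + 1) (by omega) (by omega), row_getD_replicate,
            fmatch_zero_of_lt a b _ _ (by omega)]

-- ===== VERDICT (by name: the statement is the Claim_ definition above) =====
theorem check_spec : Claim_equal_check := by
  intro a b _
  unfold Spec_check check check_alt
  obtain ⟨_, _, h3⟩ := outer_loop a b a.length (le_refl _) _ rfl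
  exact h3 a.length b.length (le_refl _) (le_refl _)
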